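-- pv_equiv track=rewrite | github.com/nmaswood/CTA-2012-Data-Visual | traffic/process.py | _common_replacements
-- ===== SOURCE A (Python) =====
-- def _common_replacements(input_str):
--
--     replacements = (
--         ("Street", "St"),
--         ("Avenue", "Ave"),
--         ("Road", "Rd"),
--         ("Boulevard", "Blvd"),
--         ("Drive", "Dr")
--     )
--
--     for (to_replace, to_replace_with) in replacements:
--
--         input_str = input_str.replace(to_replace, to_replace_with)
--
--     return input_str
-- ===== SOURCE B (Python) =====
-- def _common_replacements(input_str):
--     # Single left-to-right scan: at each position emit the abbreviation of the
--     # matching street word (or the character itself) and jump past it.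
--     out = []
--     i = 0
--     n = len(input_str)
--     while i < n:
--         if input_str.startswith("Street", i):
--             out.append("St")
--             i += 6
--         elif input_str.startswith("Avenue", i):
--             out.append("Ave")
--             i += 6
--         elif input_str.startswith("Road", i):
--             out.append("Rd")
--             i += 4
--         elif input_str.startswith("Boulevard", i):
--             out.append("Blvd")
--             i += 9
--         elif input_str.startswith("Drive", i):
--             out.append("Dr")
--             i += 5
--         else:
--             out.append(input_str[i])
--             i += 1
--     return "".join(out)
-- ===== Notes on version B (the rewrite author's own statement) =====
-- stated objective: alternative
-- what changed: Replaced five sequential whole-string replace() passes by one single left-to-right scan that matches each street word at the current position and emits its abbreviation immediately.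
import Mathlib
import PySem

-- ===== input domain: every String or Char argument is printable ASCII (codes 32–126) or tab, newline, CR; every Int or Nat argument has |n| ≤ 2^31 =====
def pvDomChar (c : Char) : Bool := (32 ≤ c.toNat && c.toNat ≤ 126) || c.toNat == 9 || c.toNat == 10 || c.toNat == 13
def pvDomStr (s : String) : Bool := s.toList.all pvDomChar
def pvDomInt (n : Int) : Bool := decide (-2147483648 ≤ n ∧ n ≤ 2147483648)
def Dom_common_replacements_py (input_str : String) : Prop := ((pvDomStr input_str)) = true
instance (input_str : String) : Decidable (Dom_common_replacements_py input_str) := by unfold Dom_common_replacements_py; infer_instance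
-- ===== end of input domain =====

-- B replaces A's five sequential whole-string replace() passes by ONE left-to-right scan that
-- matches each street word at the current position and emits its abbreviation (alternative decomposition).

-- ===== PORT A =====
def common_replacements_py (input_str : String) : String :=
  let replacements : List (String × String) :=
    [("Street", "St"), ("Avenue", "Ave"), ("Road", "Rd"), ("Boulevard", "Blvd"), ("Drive", "Dr")]
  replacements.foldl (fun s p => PySem.Str.replace s p.1 p.2) input_str

-- ===== PORT B =====
-- Source B's while loop: the current suffix input_str[i:] is the argument, out is built by append
def pvScanB : List Char → List Char
  | [] => []
  | c :: t =>
    if "Street".toList.isPrefixOf (c :: t) then "St".toList ++ pvScanB (List.drop 6 (c :: t))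
    else if "Avenue".toList.isPrefixOf (c :: t) then "Ave".toList ++ pvScanB (List.drop 6 (c :: t))
    else if "Road".toList.isPrefixOf (c :: t) then "Rd".toList ++ pvScanB (List.drop 4 (c :: t))
    else if "Boulevard".toList.isPrefixOf (c :: t) then "Blvd".toList ++ pvScanB (List.drop 9 (c :: t))
    else if "Drive".toList.isPrefixOf (c :: t) then "Dr".toList ++ pvScanB (List.drop 5 (c :: t))
    else c :: pvScanB t
termination_by cs => cs.length
decreasing_by all_goals simp


def common_replacements_py_alt (input_str : String) : String :=
  String.ofList (pvScanB input_str.toList)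

-- ===== PRECONDITION & SPEC =====
def Spec_common_replacements_py (input_str : String) (out : String) : Prop := out = common_replacements_py_alt input_str
instance (input_str : String) (out : String) : Decidable (Spec_common_replacements_py input_str out) := by unfold Spec_common_replacements_py; infer_instance

-- ===== CLAIM (what is proved, stated in full; the proofs are below) =====
def Claim_equal_common_replacements_py : Prop := ∀ (input_str : String), Dom_common_replacements_py input_str → Spec_common_replacements_py input_str (common_replacements_py input_str)

-- ===== LEMMAS AND PROOFS =====

lemma pvGo_congr (old new : List Char) (h : old ≠ []) :
    ∀ f1 f2 t acc, t.length ≤ f1 → t.length ≤ f2 →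
      PySem.Chars.replace.go old new f1 t acc = PySem.Chars.replace.go old new f2 t acc := by
  have hol : 0 < old.length := List.length_pos_iff.mpr h
  intro f1
  induction f1 with
  | zero =>
    intro f2 t acc h1 h2
    have : t = [] := List.eq_nil_of_length_eq_zero (Nat.le_zero.mp h1)
    subst this
    cases f2 with
    | zero => rfl
    | succ f2 => rw [PySem.Chars.replace.go, PySem.Chars.replace.go] <;> simp
  | succ f1 ih =>
    intro f2 t acc h1 h2
    cases f2 with
    | zero =>
      have : t = [] := List.eq_nil_of_length_eq_zero (Nat.le_zero.mp h2)
      subst this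
      rw [PySem.Chars.replace.go, PySem.Chars.replace.go] <;> simp
    | succ f2 =>
      cases t with
      | nil => rw [PySem.Chars.replace.go, PySem.Chars.replace.go] <;> omega
      | cons c tt =>
        rw [PySem.Chars.replace.go, PySem.Chars.replace.go]
        simp only [List.length_cons] at h1 h2
        by_cases hp : old.isPrefixOf (c :: tt) = true
        · simp only [hp, if_true]
          exact ih f2 _ _ (by simp; omega) (by simp; omega)
        · simp only [Bool.not_eq_true] at hp
          simp only [hp, Bool.false_eq_true, if_false]
          exact ih f2 _ _ (by omega) (by omega)

lemma pvGo_acc (old new : List Char) :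
    ∀ f t acc, PySem.Chars.replace.go old new f t acc = acc.reverse ++ PySem.Chars.replace.go old new f t [] := by
  intro f
  induction f with
  | zero => intro t acc; rw [PySem.Chars.replace.go, PySem.Chars.replace.go]; simp
  | succ f ih =>
    intro t acc
    cases t with
    | nil =>
      rw [PySem.Chars.replace.go, PySem.Chars.replace.go] <;> simp
    | cons c tt =>
      rw [PySem.Chars.replace.go]
      conv_rhs => rw [PySem.Chars.replace.go]
      by_cases hp : old.isPrefixOf (c :: tt) = true
      · simp only [hp, if_true]
        rw [ih _ (new.reverse ++ acc), ih _ (new.reverse ++ [])]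
        simp
      · simp only [Bool.not_eq_true] at hp
        simp only [hp, Bool.false_eq_true, if_false]
        rw [ih tt (c :: acc), ih tt [c]]
        simp

lemma pvReplace_nil (old new : List Char) (h : old ≠ []) : PySem.Chars.replace [] old new = [] := by
  unfold PySem.Chars.replace
  simp only [List.isEmpty_iff, h, if_false, List.length_nil]
  rw [PySem.Chars.replace.go]
  simp

lemma pvReplace_cons (old new : List Char) (c : Char) (t : List Char) (h : old ≠ [])
    (hp : old.isPrefixOf (c :: t) = false) :
    PySem.Chars.replace (c :: t) old new = c :: PySem.Chars.replace t old new := by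
  unfold PySem.Chars.replace
  simp only [List.isEmpty_iff, h, if_false, List.length_cons]
  rw [PySem.Chars.replace.go]
  simp only [hp, Bool.false_eq_true, if_false]
  rw [pvGo_acc]
  simp

lemma pvReplace_prefix (old new t : List Char) (h : old ≠ []) :
    PySem.Chars.replace (old ++ t) old new = new ++ PySem.Chars.replace t old new := by
  obtain ⟨o, os, rfl⟩ : ∃ o os, old = o :: os := by
    cases old with | nil => exact absurd rfl h | cons o os => exact ⟨o, os, rfl⟩
  unfold PySem.Chars.replace
  simp only [List.isEmpty_iff, h, if_false, List.cons_append, List.length_cons, List.length_append]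
  rw [PySem.Chars.replace.go]
  have hpre : (o :: os).isPrefixOf (o :: (os ++ t)) = true :=
    List.isPrefixOf_iff_prefix.mpr (by exact ⟨t, by simp⟩)
  simp only [hpre, if_true]
  have hdrop : List.drop (o :: os).length (o :: (os ++ t)) = t := by
    simp
  rw [hdrop]
  rw [pvGo_congr (o :: os) new h _ t.length t _ (by omega) le_rfl]
  rw [pvGo_acc]
  simp

lemma pvReplace_skip (o : Char) (os new K x : List Char) (h : o ∉ K) :
    PySem.Chars.replace (K ++ x) (o :: os) new = K ++ PySem.Chars.replace x (o :: os) new := by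
  induction K with
  | nil => simp
  | cons c K' ih =>
    have hne : o ≠ c := fun he => h (he ▸ List.mem_cons_self)
    have hp : (o :: os).isPrefixOf (c :: (K' ++ x)) = false := by
      simp [List.isPrefixOf, hne]
    rw [List.cons_append, pvReplace_cons _ _ _ _ (by simp) hp,
      ih (fun hm => h (List.mem_cons_of_mem _ hm))]
    simp

lemma pvPrefix_replace (o r : Char) (os rs : List Char) :
    ∀ (n : Nat) (x t : List Char), x.length ≤ n → (∀ c ∈ t, c ≠ o ∧ c ≠ r) →
      t.isPrefixOf (PySem.Chars.replace x (o :: os) (r :: rs)) = t.isPrefixOf x := by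
  intro n
  induction n with
  | zero =>
    intro x t h1 ht
    have : x = [] := List.eq_nil_of_length_eq_zero (Nat.le_zero.mp h1)
    subst this
    rw [pvReplace_nil _ _ (by simp)]
  | succ n ih =>
    intro x t h1 ht
    cases x with
    | nil => rw [pvReplace_nil _ _ (by simp)]
    | cons c xs =>
      by_cases hp : (o :: os).isPrefixOf (c :: xs) = true
      · obtain ⟨y, hy⟩ := List.isPrefixOf_iff_prefix.mp hp
        rw [← hy, pvReplace_prefix _ _ _ (by simp)]
        cases t with
        | nil => simp [List.isPrefixOf]
        | cons d ts =>
          have hd := ht d List.mem_cons_self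
          have e1 : (d == r) = false := beq_eq_false_iff_ne.mpr hd.2
          have e2 : (d == o) = false := beq_eq_false_iff_ne.mpr hd.1
          simp [List.isPrefixOf, e1, e2]
      · simp only [Bool.not_eq_true] at hp
        rw [pvReplace_cons _ _ _ _ (by simp) hp]
        cases t with
        | nil => simp [List.isPrefixOf]
        | cons d ts =>
          simp only [List.isPrefixOf]
          rw [ih xs ts (by simp at h1; omega) (fun c hc => ht c (List.mem_cons_of_mem _ hc))]

def pvChain (x : List Char) : List Char :=
  PySem.Chars.replace (PySem.Chars.replace (PySem.Chars.replace (PySem.Chars.replace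
    (PySem.Chars.replace x "Street".toList "St".toList)
    "Avenue".toList "Ave".toList) "Road".toList "Rd".toList)
    "Boulevard".toList "Blvd".toList) "Drive".toList "Dr".toList

lemma pvLS : "Street".toList = ['S','t','r','e','e','t'] := rfl
lemma pvLA : "Avenue".toList = ['A','v','e','n','u','e'] := rfl
lemma pvLR : "Road".toList = ['R','o','a','d'] := rfl
lemma pvLB : "Boulevard".toList = ['B','o','u','l','e','v','a','r','d'] := rfl
lemma pvLD : "Drive".toList = ['D','r','i','v','e'] := rfl
lemma pvlS : "St".toList = ['S','t'] := rfl
lemma pvlA : "Ave".toList = ['A','v','e'] := rfl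
lemma pvlR : "Rd".toList = ['R','d'] := rfl
lemma pvlB : "Blvd".toList = ['B','l','v','d'] := rfl
lemma pvlD : "Dr".toList = ['D','r'] := rfl

lemma pvChain_nil : pvChain [] = [] := by
  unfold pvChain
  rw [pvReplace_nil _ _ (by simp), pvReplace_nil _ _ (by simp), pvReplace_nil _ _ (by simp),
    pvReplace_nil _ _ (by simp), pvReplace_nil _ _ (by simp)]

set_option maxRecDepth 8192 in
lemma pvMain : ∀ (n : Nat) (x : List Char), x.length ≤ n → pvScanB x = pvChain x := by
  intro n
  induction n with
  | zero =>
    intro x hl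
    have : x = [] := List.eq_nil_of_length_eq_zero (Nat.le_zero.mp hl)
    subst this
    rw [pvChain_nil, pvScanB]
  | succ n ih =>
    intro x hl
    cases x with
    | nil => rw [pvChain_nil, pvScanB]
    | cons c t =>
      rw [pvScanB]
      simp only [List.length_cons] at hl
      by_cases h1 : "Street".toList.isPrefixOf (c :: t) = true
      · simp only [h1, if_true]
        obtain ⟨y, hy⟩ := List.isPrefixOf_iff_prefix.mp h1
        rw [pvLS] at hy
        have hdrop : List.drop 6 (c :: t) = y := by rw [← hy]; rfl
        have hyl : y.length ≤ n := by
          have := congrArg List.length hy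
          simp at this; omega
        rw [hdrop, ih y hyl, ← (pvLS ▸ hy : "Street".toList ++ y = c :: t)]
        unfold pvChain
        simp only [pvLS, pvLA, pvLR, pvLB, pvLD, pvlS, pvlA, pvlR, pvlB, pvlD]
        rw [pvReplace_prefix _ _ _ (by simp),
          pvReplace_skip 'A' _ _ _ _ (by simp),
          pvReplace_skip 'R' _ _ _ _ (by simp),
          pvReplace_skip 'B' _ _ _ _ (by simp),
          pvReplace_skip 'D' _ _ _ _ (by simp)]
      · simp only [Bool.not_eq_true] at h1
        simp only [h1, Bool.false_eq_true, if_false]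
        by_cases h2 : "Avenue".toList.isPrefixOf (c :: t) = true
        · simp only [h2, if_true]
          obtain ⟨y, hy⟩ := List.isPrefixOf_iff_prefix.mp h2
          rw [pvLA] at hy
          have hdrop : List.drop 6 (c :: t) = y := by rw [← hy]; rfl
          have hyl : y.length ≤ n := by
            have := congrArg List.length hy
            simp at this; omega
          rw [hdrop, ih y hyl, ← (pvLA ▸ hy : "Avenue".toList ++ y = c :: t)]
          unfold pvChain
          simp only [pvLS, pvLA, pvLR, pvLB, pvLD, pvlS, pvlA, pvlR, pvlB, pvlD]
          rw [pvReplace_skip 'S' _ _ _ _ (by simp),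
            pvReplace_prefix _ _ _ (by simp),
            pvReplace_skip 'R' _ _ _ _ (by simp),
            pvReplace_skip 'B' _ _ _ _ (by simp),
            pvReplace_skip 'D' _ _ _ _ (by simp)]
        · simp only [Bool.not_eq_true] at h2
          simp only [h2, Bool.false_eq_true, if_false]
          by_cases h3 : "Road".toList.isPrefixOf (c :: t) = true
          · simp only [h3, if_true]
            obtain ⟨y, hy⟩ := List.isPrefixOf_iff_prefix.mp h3
            rw [pvLR] at hy
            have hdrop : List.drop 4 (c :: t) = y := by rw [← hy]; rfl
            have hyl : y.length ≤ n := by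
              have := congrArg List.length hy
              simp at this; omega
            rw [hdrop, ih y hyl, ← (pvLR ▸ hy : "Road".toList ++ y = c :: t)]
            unfold pvChain
            simp only [pvLS, pvLA, pvLR, pvLB, pvLD, pvlS, pvlA, pvlR, pvlB, pvlD]
            rw [pvReplace_skip 'S' _ _ _ _ (by simp),
              pvReplace_skip 'A' _ _ _ _ (by simp),
              pvReplace_prefix _ _ _ (by simp),
              pvReplace_skip 'B' _ _ _ _ (by simp),
              pvReplace_skip 'D' _ _ _ _ (by simp)]
          · simp only [Bool.not_eq_true] at h3
            simp only [h3, Bool.false_eq_true, if_false]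
            by_cases h4 : "Boulevard".toList.isPrefixOf (c :: t) = true
            · simp only [h4, if_true]
              obtain ⟨y, hy⟩ := List.isPrefixOf_iff_prefix.mp h4
              rw [pvLB] at hy
              have hdrop : List.drop 9 (c :: t) = y := by rw [← hy]; rfl
              have hyl : y.length ≤ n := by
                have := congrArg List.length hy
                simp at this; omega
              rw [hdrop, ih y hyl, ← (pvLB ▸ hy : "Boulevard".toList ++ y = c :: t)]
              unfold pvChain
              simp only [pvLS, pvLA, pvLR, pvLB, pvLD, pvlS, pvlA, pvlR, pvlB, pvlD]
              rw [pvReplace_skip 'S' _ _ _ _ (by simp),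
                pvReplace_skip 'A' _ _ _ _ (by simp),
                pvReplace_skip 'R' _ _ _ _ (by simp),
                pvReplace_prefix _ _ _ (by simp),
                pvReplace_skip 'D' _ _ _ _ (by simp)]
            · simp only [Bool.not_eq_true] at h4
              simp only [h4, Bool.false_eq_true, if_false]
              by_cases h5 : "Drive".toList.isPrefixOf (c :: t) = true
              · simp only [h5, if_true]
                obtain ⟨y, hy⟩ := List.isPrefixOf_iff_prefix.mp h5
                rw [pvLD] at hy
                have hdrop : List.drop 5 (c :: t) = y := by rw [← hy]; rfl
                have hyl : y.length ≤ n := by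
                  have := congrArg List.length hy
                  simp at this; omega
                rw [hdrop, ih y hyl, ← (pvLD ▸ hy : "Drive".toList ++ y = c :: t)]
                unfold pvChain
                simp only [pvLS, pvLA, pvLR, pvLB, pvLD, pvlS, pvlA, pvlR, pvlB, pvlD]
                rw [pvReplace_skip 'S' _ _ _ _ (by simp),
                  pvReplace_skip 'A' _ _ _ _ (by simp),
                  pvReplace_skip 'R' _ _ _ _ (by simp),
                  pvReplace_skip 'B' _ _ _ _ (by simp),
                  pvReplace_prefix _ _ _ (by simp)]
              · simp only [Bool.not_eq_true] at h5
                simp only [h5, Bool.false_eq_true, if_false]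
                rw [ih t (by omega)]
                simp only [pvLS, pvLA, pvLR, pvLB, pvLD] at h1 h2 h3 h4 h5
                have g2 : (['A','v','e','n','u','e'] : List Char).isPrefixOf
                    (c :: PySem.Chars.replace t ['S','t','r','e','e','t'] ['S','t']) = false := by
                  simp only [List.isPrefixOf]
                  rw [pvPrefix_replace 'S' 'S' ['t','r','e','e','t'] ['t'] t.length t ['v','e','n','u','e'] le_rfl (by simp)]
                  simpa only [List.isPrefixOf] using h2
                have g3 : (['R','o','a','d'] : List Char).isPrefixOf
                    (c :: PySem.Chars.replace (PySem.Chars.replace t ['S','t','r','e','e','t'] ['S','t'])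
                      ['A','v','e','n','u','e'] ['A','v','e']) = false := by
                  simp only [List.isPrefixOf]
                  rw [pvPrefix_replace 'A' 'A' ['v','e','n','u','e'] ['v','e'] _ _ ['o','a','d'] le_rfl (by simp),
                    pvPrefix_replace 'S' 'S' ['t','r','e','e','t'] ['t'] _ _ ['o','a','d'] le_rfl (by simp)]
                  simpa only [List.isPrefixOf] using h3
                have g4 : (['B','o','u','l','e','v','a','r','d'] : List Char).isPrefixOf
                    (c :: PySem.Chars.replace (PySem.Chars.replace (PySem.Chars.replace t
                      ['S','t','r','e','e','t'] ['S','t']) ['A','v','e','n','u','e'] ['A','v','e'])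
                      ['R','o','a','d'] ['R','d']) = false := by
                  simp only [List.isPrefixOf]
                  rw [pvPrefix_replace 'R' 'R' ['o','a','d'] ['d'] _ _ ['o','u','l','e','v','a','r','d'] le_rfl (by simp),
                    pvPrefix_replace 'A' 'A' ['v','e','n','u','e'] ['v','e'] _ _ ['o','u','l','e','v','a','r','d'] le_rfl (by simp),
                    pvPrefix_replace 'S' 'S' ['t','r','e','e','t'] ['t'] _ _ ['o','u','l','e','v','a','r','d'] le_rfl (by simp)]
                  simpa only [List.isPrefixOf] using h4
                have g5 : (['D','r','i','v','e'] : List Char).isPrefixOf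
                    (c :: PySem.Chars.replace (PySem.Chars.replace (PySem.Chars.replace
                      (PySem.Chars.replace t ['S','t','r','e','e','t'] ['S','t'])
                      ['A','v','e','n','u','e'] ['A','v','e']) ['R','o','a','d'] ['R','d'])
                      ['B','o','u','l','e','v','a','r','d'] ['B','l','v','d']) = false := by
                  simp only [List.isPrefixOf]
                  rw [pvPrefix_replace 'B' 'B' ['o','u','l','e','v','a','r','d'] ['l','v','d'] _ _ ['r','i','v','e'] le_rfl (by simp),
                    pvPrefix_replace 'R' 'R' ['o','a','d'] ['d'] _ _ ['r','i','v','e'] le_rfl (by simp),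
                    pvPrefix_replace 'A' 'A' ['v','e','n','u','e'] ['v','e'] _ _ ['r','i','v','e'] le_rfl (by simp),
                    pvPrefix_replace 'S' 'S' ['t','r','e','e','t'] ['t'] _ _ ['r','i','v','e'] le_rfl (by simp)]
                  simpa only [List.isPrefixOf] using h5
                unfold pvChain
                simp only [pvLS, pvLA, pvLR, pvLB, pvLD, pvlS, pvlA, pvlR, pvlB, pvlD]
                rw [pvReplace_cons _ _ _ _ (by simp) h1,
                  pvReplace_cons _ _ _ _ (by simp) g2,
                  pvReplace_cons _ _ _ _ (by simp) g3,
                  pvReplace_cons _ _ _ _ (by simp) g4,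
                  pvReplace_cons _ _ _ _ (by simp) g5]

-- the five PySem.Str.replace passes of port A, seen on the character-list side, are pvChain
lemma pvChain_toStr (u : String) :
    String.ofList (pvChain u.toList) =
      PySem.Str.replace (PySem.Str.replace (PySem.Str.replace (PySem.Str.replace
        (PySem.Str.replace u "Street" "St") "Avenue" "Ave") "Road" "Rd")
        "Boulevard" "Blvd") "Drive" "Dr" := by
  have h : (PySem.Str.replace (PySem.Str.replace (PySem.Str.replace (PySem.Str.replace
      (PySem.Str.replace u "Street" "St") "Avenue" "Ave") "Road" "Rd")
      "Boulevard" "Blvd") "Drive" "Dr").toList = pvChain u.toList := by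
    simp only [PySem.Str.toList_replace, pvChain]
  rw [← h, String.ofList_toList]

-- ===== VERDICT (by name: the statement is the Claim_ definition above) =====
theorem common_replacements_py_spec : Claim_equal_common_replacements_py := by
  intro s _
  unfold Spec_common_replacements_py common_replacements_py common_replacements_py_alt
  simp only [List.foldl]
  rw [pvMain s.toList.length s.toList le_rfl, pvChain_toStr s]
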